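-- pv_equiv track=rewrite | github.com/T0my-commits/Roboc | elements.py | partie
-- ===== SOURCE A (Python) =====
-- def partie(parties_new):
-- #	Définition de la variable parties. Cette variable contient chaques lignes du
-- #	labyrinthe, de manière à pouvoir le manipuler plus simplement.
--
-- 	chaine = str(parties_new[1])
-- 	liste = list()
-- 	parties = dict()
-- 	indice = 0
-- 	for i in chaine:
-- 		if i != '\n':
-- 			liste.append(i)
-- 		else:
-- 			parties[indice] = liste
-- 			liste = list()
-- 			indice += 1
-- 	return parties
-- ===== SOURCE B (Python) =====
-- def partie(parties_new):
--     chaine = str(parties_new[1])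
--     lines = chaine.split('\n')
--     return {i: list(line) for i, line in enumerate(lines[:-1])}
-- ===== Notes on version B (the rewrite author's own statement) =====
-- stated objective: idiomatic
-- what changed: Replaces the per-character accumulator loop with a branch (build list, reset on newline, manual index counter) by split('\n') plus a dict comprehension over enumerate(lines[:-1]).
import Mathlib
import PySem

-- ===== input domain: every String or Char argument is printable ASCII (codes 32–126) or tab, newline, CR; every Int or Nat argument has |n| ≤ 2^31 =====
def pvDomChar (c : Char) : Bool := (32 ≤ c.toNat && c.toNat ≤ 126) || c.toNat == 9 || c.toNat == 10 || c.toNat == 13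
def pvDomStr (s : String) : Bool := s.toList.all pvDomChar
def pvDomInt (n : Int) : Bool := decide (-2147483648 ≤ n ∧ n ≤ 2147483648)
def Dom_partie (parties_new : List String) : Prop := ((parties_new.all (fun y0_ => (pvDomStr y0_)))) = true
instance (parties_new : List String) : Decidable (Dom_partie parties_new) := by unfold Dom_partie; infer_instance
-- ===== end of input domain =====

-- B replaces A's per-character accumulator loop by split('\n') + a comprehension over enumerate(lines[:-1]); same cost, more idiomatic.

-- ===== PORT A =====
-- one character of the iterated string, appended as a 1-char string (Python's `for i in chaine`)
def partieMk1 (c : Char) : String := String.ofList [c]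

-- the body of A's for-loop; state = (liste, parties, indice)
def partieStep (st : List String × PySem.Dict Int (List String) × Int) (c : Char) :
    List String × PySem.Dict Int (List String) × Int :=
  if c ≠ '\n' then (st.1 ++ [partieMk1 c], st.2.1, st.2.2)
  else ([], st.2.1.insert st.2.2 st.1, st.2.2 + 1)

def partie (parties_new : List String) : List (Int × List String) :=
  -- chaine = parties_new[1] (none excluded by Pre_); fold the loop body over its characters
  ((((PySem.List.pyGet? parties_new 1).getD "").toList.foldl partieStep
      ([], PySem.Dict.empty, 0)).2.1).items

-- ===== PORT B =====
def partie_alt (parties_new : List String) : List (Int × List String) :=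
  -- chaine = parties_new[1] (none excluded by Pre_); lines = chaine.split('\n');
  -- {i: list(line) for i, line in enumerate(lines[:-1])}: keys 0..n-1 are distinct,
  -- so the dict is the association list in insertion order
  (PySem.List.enumerate
      (PySem.List.slice
        (PySem.Chars.splitOn ((PySem.List.pyGet? parties_new 1).getD "").toList ['\n'])
        none (some (-1)))).map
    (fun p => (p.1, p.2.map partieMk1))

-- ===== PRECONDITION & SPEC =====
-- Pre_ excludes only the inputs where A raises IndexError (fewer than two elements).
def Pre_partie (parties_new : List String) : Prop := 2 ≤ parties_new.length
instance (parties_new : List String) : Decidable (Pre_partie parties_new) := by unfold Pre_partie; infer_instance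
def pvWitness_partie : List String := ["ab", "x\ny\nz"]

def Spec_partie (parties_new : List String) (out : List (Int × List String)) : Prop := out = partie_alt parties_new
instance (parties_new : List String) (out : List (Int × List String)) : Decidable (Spec_partie parties_new out) := by unfold Spec_partie; infer_instance

-- ===== CLAIM (what is proved, stated in full; the proofs are below) =====
def Claim_equal_partie : Prop := ∀ (parties_new : List String), Dom_partie parties_new → Pre_partie parties_new → Spec_partie parties_new (partie parties_new)

-- ===== LEMMAS AND PROOFS =====

-- clean recursive characterisation of splitting on '\n' with a (reversed) partial line `cur`
def partieF : List Char → List Char → List (List Char)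
  | [], cur => [cur.reverse]
  | c :: t, cur => if c = '\n' then cur.reverse :: partieF t [] else partieF t (c :: cur)

theorem partieF_ne_nil (l cur : List Char) : partieF l cur ≠ [] := by
  induction l generalizing cur with
  | nil => simp [partieF]
  | cons c t ih => by_cases h : c = '\n' <;> simp [partieF, h, ih]

theorem partie_go_eq (fuel : Nat) : ∀ (l cur : List Char) (acc : List (List Char)),
    l.length < fuel →
    PySem.Chars.splitOn.go ['\n'] fuel l cur acc = acc.reverse ++ partieF l cur := by
  induction fuel with
  | zero => intro l cur acc h; omega
  | succ n ih =>
    intro l cur acc h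
    cases l with
    | nil => simp [PySem.Chars.splitOn.go, partieF]
    | cons c t =>
      by_cases hc : c = '\n'
      · subst hc
        rw [show PySem.Chars.splitOn.go ['\n'] (n+1) ('\n' :: t) cur acc
              = PySem.Chars.splitOn.go ['\n'] n t [] (cur.reverse :: acc) by
            simp [PySem.Chars.splitOn.go, List.isPrefixOf]]
        rw [ih t [] (cur.reverse :: acc) (by simpa using h)]
        simp [partieF]
      · rw [show PySem.Chars.splitOn.go ['\n'] (n+1) (c :: t) cur acc
              = PySem.Chars.splitOn.go ['\n'] n t (c :: cur) acc by
            simp [PySem.Chars.splitOn.go, List.isPrefixOf, Ne.symm hc]]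
        rw [ih t (c :: cur) acc (by simpa using h)]
        simp [partieF, hc]

theorem partie_splitOn_eq (l : List Char) :
    PySem.Chars.splitOn l ['\n'] = partieF l [] := by
  have := partie_go_eq (l.length + 1) l [] [] (by omega)
  simpa [PySem.Chars.splitOn] using this

theorem partie_loop_eq : ∀ (l cur : List Char) (d : PySem.Dict Int (List String)) (ind : Int),
    (∀ k : Int, d.contains k = true → k < ind) →
    ((l.foldl partieStep (cur.reverse.map partieMk1, d, ind)).2.1).items
      = d.items ++ (PySem.List.enumerate ((partieF l cur).dropLast) ind).map
          (fun p => (p.1, p.2.map partieMk1)) := by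
  intro l
  induction l with
  | nil => intro cur d ind _; simp [partieF]
  | cons c t ih =>
    intro cur d ind hd
    by_cases hc : c = '\n'
    · subst hc
      have hfresh : d.contains ind = false := by
        by_cases h : d.contains ind = true
        · exact absurd (hd ind h) (lt_irrefl ind)
        · simpa using h
      have hstep : partieStep (cur.reverse.map partieMk1, d, ind) '\n'
          = ([], d.insert ind (cur.reverse.map partieMk1), ind + 1) := by
        simp [partieStep]
      have hd' : ∀ k : Int, (d.insert ind (cur.reverse.map partieMk1)).contains k = true → k < ind + 1 := by
        intro k hk
        rw [PySem.Dict.contains_insert d ind k (cur.reverse.map partieMk1)] at hk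
        rcases Bool.or_eq_true_iff.mp hk with h | h
        · have : k = ind := by simpa using h
          omega
        · exact lt_trans (hd k h) (by omega)
      have := ih [] (d.insert ind (cur.reverse.map partieMk1)) (ind + 1) hd'
      simp only [List.foldl_cons, hstep]
      rw [show ([] : List String) = (([] : List Char).reverse.map partieMk1) by simp, this]
      rw [PySem.Dict.items_insert_of_not_contains d _ hfresh]
      rw [show partieF ('\n' :: t) cur = cur.reverse :: partieF t [] by simp [partieF]]
      rw [List.dropLast_cons_of_ne_nil (partieF_ne_nil t [])]
      simp [PySem.List.enumerate_cons]
    · have hstep : partieStep (cur.reverse.map partieMk1, d, ind) c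
          = ((c :: cur).reverse.map partieMk1, d, ind) := by
        simp [partieStep, hc]
      have := ih (c :: cur) d ind hd
      simp only [List.foldl_cons, hstep, this]
      simp [partieF, hc]

-- ===== VERDICT (by name: the statement is the Claim_ definition above) =====
theorem partie_spec : Claim_equal_partie := by
  intro parties_new _ _
  unfold Spec_partie partie partie_alt
  have h0 : ∀ k : Int, (PySem.Dict.empty : PySem.Dict Int (List String)).contains k = true → k < 0 := by
    intro k hk; simp [PySem.Dict.contains, PySem.Dict.empty] at hk
  have := partie_loop_eq ((PySem.List.pyGet? parties_new 1).getD "").toList [] PySem.Dict.empty 0 h0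
  simp only [List.reverse_nil, List.map_nil] at this
  rw [this, partie_splitOn_eq, PySem.List.slice_to_neg_one]
  simp [PySem.Dict.empty]
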